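-- pv_equiv track=rewrite | github.com/ShadowPrince001/Timetable | genetic_timetable_generator.py | _count_room_conflicts
-- ===== SOURCE A (Python) =====
-- from typing import List, Dict, Tuple, Optional
--
-- def _count_room_conflicts(solution: List) -> int:
--     """Count room scheduling conflicts"""
--     room_time = {}
--     conflicts = 0
--
--     for assignment in solution:
--         key = (assignment['time_slot_id'], assignment['classroom_id'])
--         if key in room_time:
--             conflicts += 1
--         else:
--             room_time[key] = assignment
--
--     return conflicts
-- ===== SOURCE B (Python) =====
-- def _count_room_conflicts(solution):
--     """Count room scheduling conflicts by sorting the (time_slot, classroom) keys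
--     and counting adjacent equal pairs (duplicates become neighbours after sorting)."""
--     keys = sorted((a['time_slot_id'], a['classroom_id']) for a in solution)
--     conflicts = 0
--     for prev, cur in zip(keys, keys[1:]):
--         if prev == cur:
--             conflicts += 1
--     return conflicts
-- ===== Notes on version B (the rewrite author's own statement) =====
-- stated objective: alternative
-- what changed: Replaces A's hash-based incremental repeat detection (growing dict plus branch) with a sort of the key list followed by a scan counting adjacent equal pairs; correct because sorting makes equal keys adjacent, so duplicates = adjacent equal neighbours.
import Mathlib
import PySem

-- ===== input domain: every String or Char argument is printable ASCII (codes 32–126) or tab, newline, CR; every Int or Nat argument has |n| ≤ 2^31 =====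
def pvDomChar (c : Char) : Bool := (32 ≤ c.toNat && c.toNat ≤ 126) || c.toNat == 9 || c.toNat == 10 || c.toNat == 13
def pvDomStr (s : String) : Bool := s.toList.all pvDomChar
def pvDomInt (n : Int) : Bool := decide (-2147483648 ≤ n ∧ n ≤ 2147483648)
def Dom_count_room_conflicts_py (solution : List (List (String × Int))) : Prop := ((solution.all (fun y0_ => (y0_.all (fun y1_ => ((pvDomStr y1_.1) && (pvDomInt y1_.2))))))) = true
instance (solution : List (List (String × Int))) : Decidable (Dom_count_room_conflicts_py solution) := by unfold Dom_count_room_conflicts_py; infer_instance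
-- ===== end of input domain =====

-- B replaces A's hash-based incremental repeat detection (dict + branch) with
-- sort-the-keys then count adjacent equal pairs (objective: alternative algorithm).

-- key of one assignment: (assignment['time_slot_id'], assignment['classroom_id']);
-- getD 0 is total — Pre_ excludes the inputs where Python's dict lookup would raise KeyError.
def pvKey (a : List (String × Int)) : Int × Int :=
  ((PySem.Dict.ofList a).getD "time_slot_id" 0, (PySem.Dict.ofList a).getD "classroom_id" 0)

-- ===== PORT A =====
def count_room_conflicts_py (solution : List (List (String × Int))) : Int :=
  (solution.foldl
    (fun st a =>
      let key := pvKey a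
      if st.1.contains key then (st.1, st.2 + 1)
      else (st.1.insert key a, st.2))
    ((PySem.Dict.empty : PySem.Dict (Int × Int) (List (String × Int))), (0 : Int))).2

-- ===== PORT B =====
-- sorted(tuples) → PySem.List.sorted2 (Python's lexicographic tuple order);
-- zip(keys, keys[1:]) → s.zip s.tail; the loop is the foldl over that zip.
def count_room_conflicts_py_alt (solution : List (List (String × Int))) : Int :=
  let keys := solution.map pvKey
  let s := PySem.List.sorted2 keys (fun k => k.1) (fun k => k.2)
  (s.zip s.tail).foldl (fun c p => if p.1 = p.2 then c + 1 else c) 0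

-- ===== PRECONDITION & SPEC =====
-- Pre_: every assignment carries both keys; on the rest Python A (and B) raise KeyError.
def Pre_count_room_conflicts_py (solution : List (List (String × Int))) : Prop :=
  (solution.all (fun a =>
    (PySem.Dict.ofList a).contains "time_slot_id" &&
    (PySem.Dict.ofList a).contains "classroom_id")) = true
instance (solution : List (List (String × Int))) : Decidable (Pre_count_room_conflicts_py solution) := by unfold Pre_count_room_conflicts_py; infer_instance

def pvWitness_count_room_conflicts_py : (List (List (String × Int))) :=
  [[("time_slot_id", 1), ("classroom_id", 2)], [("classroom_id", 2), ("time_slot_id", 1)]]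

def Spec_count_room_conflicts_py (solution : List (List (String × Int))) (out : Int) : Prop := out = count_room_conflicts_py_alt solution
instance (solution : List (List (String × Int))) (out : Int) : Decidable (Spec_count_room_conflicts_py solution out) := by unfold Spec_count_room_conflicts_py; infer_instance

-- ===== CLAIM =====
def Claim_equal_count_room_conflicts_py : Prop := ∀ (solution : List (List (String × Int))), Dom_count_room_conflicts_py solution → Pre_count_room_conflicts_py solution → Spec_count_room_conflicts_py solution (count_room_conflicts_py solution)

-- ===== LEMMAS AND PROOFS =====

-- A-side: conflicts so far plus distinct keys accumulated = initial count + items seen + initial keys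
theorem pv_loop_invariant (l : List (List (String × Int)))
    (d : PySem.Dict (Int × Int) (List (String × Int))) (c : Int) :
    (l.foldl
      (fun st a =>
        let key := pvKey a
        if st.1.contains key then (st.1, st.2 + 1)
        else (st.1.insert key a, st.2)) (d, c)).2
      + ((PySem.Set.update d.keys (l.map pvKey)).length : Int)
    = c + l.length + d.keys.length := by
  induction l generalizing d c with
  | nil => simp [PySem.Set.update]
  | cons a t ih =>
    simp only [List.foldl_cons, List.map_cons]
    have hupd : PySem.Set.update d.keys (pvKey a :: t.map pvKey)
        = PySem.Set.update (PySem.Set.add d.keys (pvKey a)) (t.map pvKey) := by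
      simp [PySem.Set.update]
    by_cases h : d.contains (pvKey a) = true
    · have hmem : pvKey a ∈ d.keys := (PySem.Dict.contains_iff_mem_keys d (pvKey a)).1 h
      have hadd : PySem.Set.add d.keys (pvKey a) = d.keys := by
        simp [PySem.Set.add, PySem.Set.contains, hmem]
      simp only [h, if_pos]
      rw [hupd, hadd]
      have := ih d (c + 1)
      simp only [List.length_cons] at this ⊢
      push_cast at this ⊢
      omega
    · have hmem : pvKey a ∉ d.keys := fun hm =>
        h ((PySem.Dict.contains_iff_mem_keys d (pvKey a)).2 hm)
      have hadd : PySem.Set.add d.keys (pvKey a) = d.keys ++ [pvKey a] := by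
        simp [PySem.Set.add, PySem.Set.contains, hmem]
      have hkeys : (d.insert (pvKey a) a).keys = d.keys ++ [pvKey a] :=
        PySem.Dict.keys_insert_of_not_contains d a (by simpa using h)
      simp only [h, if_neg, Bool.false_eq_true, not_false_iff]
      rw [hupd, hadd]
      have := ih (d.insert (pvKey a) a) c
      rw [hkeys] at this
      simp only [List.length_cons, List.length_append, List.length_nil] at this ⊢
      push_cast at this ⊢
      omega

-- B-side helper (proofs only): structural count of adjacent equal pairs
def pvAdj : List (Int × Int) → Int
  | a :: b :: t => (if a = b then 1 else 0) + pvAdj (b :: t)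
  | _ => 0

-- B's foldl over zip(s, s[1:]) computes pvAdj
theorem pv_zip_foldl_eq_adj (s : List (Int × Int)) (c : Int) :
    (s.zip s.tail).foldl (fun c p => if p.1 = p.2 then c + 1 else c) c = c + pvAdj s := by
  induction s generalizing c with
  | nil => simp [pvAdj]
  | cons a t ih =>
    cases t with
    | nil => simp [pvAdj]
    | cons b t' =>
      have := ih (c := if a = b then c + 1 else c)
      simp only [List.tail_cons, List.zip_cons_cons, List.foldl_cons] at this ⊢
      rw [this]
      simp only [pvAdj]
      split_ifs <;> omega

-- sorted2 with the two projections is sorted under the lexicographic linear order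
theorem pv_sorted2_eq_sorted_lex (xs : List (Int × Int)) :
    PySem.List.sorted2 xs (fun k => k.1) (fun k => k.2)
      = PySem.List.sorted xs (fun k => (toLex k : Lex (Int × Int))) := by
  unfold PySem.List.sorted2 PySem.List.sorted
  have hbef : (fun (a b : Int × Int) =>
        decide (a.1 < b.1) || (!decide (b.1 < a.1) && decide (a.2 < b.2)))
      = fun (a b : Int × Int) => decide ((toLex a : Lex (Int × Int)) < toLex b) := by
    funext a b
    rw [Bool.eq_iff_iff]
    simp only [Bool.or_eq_true, Bool.and_eq_true, Bool.not_eq_true', decide_eq_true_eq,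
      decide_eq_false_iff_not, Prod.Lex.lt_iff, ofLex_toLex]
    omega
  simp only [if_neg (by decide : ¬ (false = true))]
  rw [hbef]

-- main counting lemma: on a lex-sorted list, adjacent duplicates = length − distinct
theorem pv_adj_sorted (s : List (Int × Int))
    (hs : s.Pairwise (fun a b => (toLex a : Lex (Int × Int)) ≤ toLex b)) :
    pvAdj s = (s.length : Int) - s.toFinset.card := by
  induction s with
  | nil => simp [pvAdj]
  | cons a t ih =>
    rcases List.pairwise_cons.mp hs with ⟨hall, ht⟩
    have iht := ih ht
    cases t with
    | nil => simp [pvAdj]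
    | cons b t' =>
      by_cases hab : a = b
      · subst hab
        simp only [pvAdj, List.toFinset_cons, Finset.insert_idem]
        simp only [List.toFinset_cons] at iht
        simp only [List.length_cons] at iht ⊢
        push_cast at iht ⊢
        omega
      · have hnotmem : a ∉ b :: t' := by
          intro hmem
          rcases List.mem_cons.mp hmem with h | h
          · exact hab h
          · -- a after b in the sorted tail: toLex b ≤ toLex a, and toLex a ≤ toLex b
            have h1 : (toLex a : Lex (Int × Int)) ≤ toLex b := hall b (List.mem_cons_self ..)
            have h2 : (toLex b : Lex (Int × Int)) ≤ toLex a := by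
              rcases List.pairwise_cons.mp ht with ⟨hb, _⟩
              exact hb a h
            exact hab (toLex.injective (le_antisymm h1 h2))
        have hcard : ((a :: b :: t').toFinset).card = ((b :: t').toFinset).card + 1 := by
          rw [List.toFinset_cons, Finset.card_insert_of_notMem (by simpa using hnotmem)]
        simp only [pvAdj, if_neg hab]
        simp only [List.length_cons] at iht ⊢
        rw [hcard]
        push_cast at iht ⊢
        omega

-- a PySem set of xs has as many elements as xs.toFinset
theorem pv_setOfList_length {α : Type} [BEq α] [LawfulBEq α] [DecidableEq α] (xs : List α) :
    (PySem.Set.ofList xs).length = xs.toFinset.card := by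
  have hnd : (PySem.Set.ofList xs).Nodup := PySem.Set.nodup_ofList xs
  have hfs : (PySem.Set.ofList xs).toFinset = xs.toFinset := by
    ext x
    simp [PySem.Set.mem_ofList]
  rw [← List.toFinset_card_of_nodup hnd, hfs]

-- A's closed form: conflicts + distinct keys = total
theorem pv_A_closed (solution : List (List (String × Int))) :
    count_room_conflicts_py solution
      + ((PySem.Set.ofList (solution.map pvKey)).length : Int)
    = solution.length := by
  unfold count_room_conflicts_py
  have h := pv_loop_invariant solution PySem.Dict.empty 0
  have hof : PySem.Set.update (PySem.Dict.empty
      (κ := Int × Int) (ν := List (String × Int))).keys (solution.map pvKey)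
      = PySem.Set.ofList (solution.map pvKey) := by
    simp [PySem.Set.update, PySem.Set.ofList_eq_foldl, PySem.Dict.keys_empty]
  rw [hof] at h
  simp only [PySem.Dict.keys_empty, List.length_nil] at h ⊢
  omega

-- ===== VERDICT =====
theorem count_room_conflicts_py_spec : Claim_equal_count_room_conflicts_py := by
  intro solution _ _
  unfold Spec_count_room_conflicts_py count_room_conflicts_py_alt
  have hA := pv_A_closed solution
  set keys := solution.map pvKey with hkeys
  set s := PySem.List.sorted2 keys (fun k => k.1) (fun k => k.2) with hsdef
  have hperm : s.Perm keys := PySem.List.sorted2_perm keys _ _ false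
  have hpw : s.Pairwise (fun a b => (toLex a : Lex (Int × Int)) ≤ toLex b) := by
    rw [hsdef, pv_sorted2_eq_sorted_lex]
    exact PySem.List.sorted_pairwise keys _
  have hB := pv_zip_foldl_eq_adj s 0
  have hadj := pv_adj_sorted s hpw
  have hlen : s.length = keys.length := hperm.length_eq
  have hfin : s.toFinset = keys.toFinset := List.toFinset_eq_of_perm _ _ hperm
  have hset : (PySem.Set.ofList keys).length = keys.toFinset.card :=
    pv_setOfList_length keys
  have hklen : keys.length = solution.length := by rw [hkeys]; exact List.length_map ..
  rw [hB, hadj, hlen, hfin]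
  omega
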